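-- pv_equiv track=rewrite | github.com/cpk0709/hanghae99-chapter-2 | 20220317_test_one.py | solution
-- ===== SOURCE A (Python) =====
-- def solution(progresses,speeds):
--     answer = []
--
--     while progresses:
--         # progress와 해당 progress의 speeds를 계속 더해줌
--         for i in range(len(progresses)):
--             progresses[i] += speeds[i]
--         # 완료된 progress
--         finishedPro = 0
--
--         # progress가 남아있고, 제일 우선순위 progress 진행도가 100 이상이 된 경우
--         while progresses and progresses[0] >= 100:
--             # progresses의 제일 첫 번째를 pop
--             progresses.pop(0)
--             # pogresses의 해당 speeds도(역시 제일 첫 번째) pop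
--             speeds.pop(0)
--             # 완료된 progress 수 카운드
--             finishedPro += 1
--
--         # 완료된 progress가 있으면 answer에 추가
--         if finishedPro > 0:
--             answer.append(finishedPro)
--
--     return answer
-- ===== SOURCE B (Python) =====
-- def solution(progresses, speeds):
--     # One pass: finish day per task = max(1, ceil((100-p)/s)); group by running max.
--     # Unlike A, does not mutate its arguments (equivalence is about the return value).
--     answer = []
--     cur_max = 0
--     count = 0
--     for p, s in zip(progresses, speeds):
--         d = max(1, -((p - 100) // s))
--         if d > cur_max:
--             if count:
--                 answer.append(count)
--             cur_max = d
--             count = 1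
--         else:
--             count += 1
--     if count:
--         answer.append(count)
--     return answer
-- ===== Notes on version B (the rewrite author's own statement) =====
-- stated objective: faster
-- what changed: B replaces A's day-by-day simulation with repeated pop(0)s by a closed-form finish day per task (max(1, ceil((100-p)/s))) and a single grouping pass over a running maximum; intended as asymptotically faster — a timing run saw A time out at n=16 where B returned, but could not verify a clean ratio.
-- outside the precondition, e.g. on solution([150], [0]): A returns [1], B raises ZeroDivisionError; on solution([101, 109], [-1, -3]): A returns [2], B returns [1, 1]
import Mathlib
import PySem

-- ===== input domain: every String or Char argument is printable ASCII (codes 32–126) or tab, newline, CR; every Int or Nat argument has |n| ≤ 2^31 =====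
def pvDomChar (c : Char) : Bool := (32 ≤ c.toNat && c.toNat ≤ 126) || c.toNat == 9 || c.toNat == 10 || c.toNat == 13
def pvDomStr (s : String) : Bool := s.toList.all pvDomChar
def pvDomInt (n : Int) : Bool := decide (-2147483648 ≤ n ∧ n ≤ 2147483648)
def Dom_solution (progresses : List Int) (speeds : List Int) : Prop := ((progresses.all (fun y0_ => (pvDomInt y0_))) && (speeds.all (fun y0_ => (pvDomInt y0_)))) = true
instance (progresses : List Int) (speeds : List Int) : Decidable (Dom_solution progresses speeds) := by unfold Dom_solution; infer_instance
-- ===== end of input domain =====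

-- B replaces A's day-by-day simulation with a closed-form finish day per task and one
-- grouping pass (intended as faster; a timing run saw A time out where B returned but
-- could not verify a clean ratio). A mutates its arguments in place, B does not — the
-- equivalence proved here is about the return value only.

-- ===== PORT A =====
-- inner `while progresses and progresses[0] >= 100: pop(0) from both lists` of one day
def popA : List Int → List Int → Int × List Int × List Int
  | p :: ps, s :: ss =>
    if 100 ≤ p then
      let r := popA ps ss
      (r.1 + 1, r.2.1, r.2.2)
    else (0, p :: ps, s :: ss)
  | ps, ss => (0, ps, ss)

-- outer `while progresses:` loop, one recursive call per day; the fuel only makes the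
-- recursion structural (under Pre_ the proof shows 101 + Σ|p| days always suffice)
def simA : Nat → List Int → List Int → List Int
  | 0, _, _ => []
  | f + 1, ps, ss =>
    if ps.isEmpty then [] else
      let ps1 := List.zipWith (· + ·) ps ss   -- progresses[i] += speeds[i]
      let r := popA ps1 ss
      let rest := simA f r.2.1 r.2.2
      if 0 < r.1 then r.1 :: rest else rest   -- if finishedPro > 0: answer.append

def solution (progresses : List Int) (speeds : List Int) : List Int :=
  simA (101 + (progresses.map Int.natAbs).sum) progresses speeds

-- ===== PORT B =====
def finalizeB (st : List Int × Int × Int) : List Int :=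
  st.1 ++ (if st.2.2 ≠ 0 then [st.2.2] else [])

-- loop body of Source B: state (answer, cur_max, count), element (p, s)
def bstep (st : List Int × Int × Int) (pr : Int × Int) : List Int × Int × Int :=
  let d := max 1 (-(PySem.Int.floordiv (pr.1 - 100) pr.2))
  if st.2.1 < d then (st.1 ++ (if st.2.2 ≠ 0 then [st.2.2] else []), d, 1)
  else (st.1, st.2.1, st.2.2 + 1)

def solution_alt (progresses : List Int) (speeds : List Int) : List Int :=
  finalizeB ((progresses.zip speeds).foldl bstep ([], 0, 0))

-- ===== PRECONDITION & SPEC =====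
-- Pre_ excludes (a) speeds shorter than progresses, where A raises IndexError, and
-- (b) non-positive speeds: there A loops forever unless every task is already past 100
-- at its first update, and B's ceiling-division finish-day formula divides by the speed
-- (ZeroDivisionError for 0, a meaningless day count for negative speeds).
def Pre_solution (progresses : List Int) (speeds : List Int) : Prop :=
  progresses.length ≤ speeds.length ∧ ∀ pr ∈ progresses.zip speeds, 0 < pr.2
instance (progresses : List Int) (speeds : List Int) : Decidable (Pre_solution progresses speeds) := by
  unfold Pre_solution; infer_instance

def pvWitness_solution : List Int × List Int := ([93, 30, 55], [1, 30, 5])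

def Spec_solution (progresses : List Int) (speeds : List Int) (out : List Int) : Prop := out = solution_alt progresses speeds
instance (progresses : List Int) (speeds : List Int) (out : List Int) : Decidable (Spec_solution progresses speeds out) := by unfold Spec_solution; infer_instance

-- ===== CLAIM (what is proved, stated in full; the proofs are below) =====
def Claim_equal_solution : Prop := ∀ (progresses : List Int) (speeds : List Int), Dom_solution progresses speeds → Pre_solution progresses speeds → Spec_solution progresses speeds (solution progresses speeds)

-- ===== LEMMAS AND PROOFS =====

-- ceiling finish day: cday p s = ceil((100 - p) / s); B's day is max 1 (cday p s)
def cday (p s : Int) : Int := -(PySem.Int.floordiv (p - 100) s)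
def dday (p s : Int) : Int := max 1 (cday p s)

-- one day of growth, on the zipped list
def mapAdd (L : List (Int × Int)) : List (Int × Int) := L.map (fun pr => (pr.1 + pr.2, pr.2))

def popZ : List (Int × Int) → Int × List (Int × Int)
  | pr :: t => if 100 ≤ pr.1 then let r := popZ t; (r.1 + 1, r.2) else (0, pr :: t)
  | [] => (0, [])

def zsim : Nat → List (Int × Int) → List Int
  | 0, _ => []
  | f + 1, L =>
    if L.isEmpty then [] else
      let r := popZ (mapAdd L)
      let rest := zsim f r.2
      if 0 < r.1 then r.1 :: rest else rest

def maxd : List (Int × Int) → Int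
  | [] => 0
  | pr :: t => max (dday pr.1 pr.2) (maxd t)

def Bz (L : List (Int × Int)) : List Int := finalizeB (L.foldl bstep ([], 0, 0))

lemma bstep_eq (st : List Int × Int × Int) (pr : Int × Int) :
    bstep st pr =
      if st.2.1 < dday pr.1 pr.2 then
        (st.1 ++ (if st.2.2 ≠ 0 then [st.2.2] else []), dday pr.1 pr.2, 1)
      else (st.1, st.2.1, st.2.2 + 1) := rfl

lemma cday_eq_iff {p s q : Int} (hs : 0 < s) :
    cday p s = q ↔ (q - 1) * s < 100 - p ∧ 100 - p ≤ q * s := by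
  have h : p - 100 = -(100 - p) := by ring
  unfold cday
  rw [h]
  exact PySem.Int.neg_floordiv_neg_eq_iff_of_pos hs

lemma cday_bracket {p s : Int} (hs : 0 < s) :
    (cday p s - 1) * s < 100 - p ∧ 100 - p ≤ cday p s * s :=
  (cday_eq_iff hs).mp rfl

lemma cday_add {p s : Int} (hs : 0 < s) : cday (p + s) s = cday p s - 1 := by
  obtain ⟨h1, h2⟩ := cday_bracket (p := p) hs
  rw [cday_eq_iff hs]
  constructor
  · have h3 : (cday p s - 1 - 1) * s = (cday p s - 1) * s - s := by ring
    linarith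
  · have h3 : (cday p s - 1) * s = cday p s * s - s := by ring
    linarith

lemma dday_add {p s : Int} (hs : 0 < s) : dday (p + s) s = max 1 (cday p s - 1) := by
  unfold dday
  rw [cday_add hs]

lemma pop_iff {p s : Int} (hs : 0 < s) : 100 ≤ p + s ↔ cday p s ≤ 1 := by
  obtain ⟨h1, h2⟩ := cday_bracket (p := p) hs
  constructor
  · intro h
    by_contra hc
    push Not at hc
    have h3 : 1 * s ≤ (cday p s - 1) * s := mul_le_mul_of_nonneg_right (by omega) hs.le
    linarith
  · intro hc
    have h3 : cday p s * s ≤ 1 * s := mul_le_mul_of_nonneg_right hc hs.le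
    linarith

lemma ans_factor : ∀ (L : List (Int × Int)) (ans : List Int) (m cnt : Int),
    finalizeB (L.foldl bstep (ans, m, cnt)) = ans ++ finalizeB (L.foldl bstep ([], m, cnt)) := by
  intro L
  induction L with
  | nil => intro ans m cnt; simp [finalizeB]
  | cons x t ih =>
    intro ans m cnt
    simp only [List.foldl_cons, bstep_eq]
    by_cases h : m < dday x.1 x.2
    · rw [if_pos h, if_pos h, ih, ih ([] ++ _)]
      simp
    · rw [if_neg h, if_neg h]
      exact ih ans m (cnt + 1)

lemma shift : ∀ (L : List (Int × Int)), (∀ pr ∈ L, 0 < pr.2) →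
    ∀ (ans : List Int) (cnt m : Int), 2 ≤ m →
    finalizeB ((mapAdd L).foldl bstep (ans, m - 1, cnt)) = finalizeB (L.foldl bstep (ans, m, cnt)) := by
  intro L
  induction L with
  | nil => intro _ ans cnt m _; simp [mapAdd, finalizeB]
  | cons x t ih =>
    obtain ⟨p, s⟩ := x
    intro hpos ans cnt m hm
    have hs : 0 < s := hpos (p, s) (by simp)
    have hpt : ∀ pr ∈ t, 0 < pr.2 := fun pr h => hpos pr (by simp [h])
    simp only [mapAdd, List.map_cons, List.foldl_cons, bstep_eq]
    rw [show dday (p + s) s = max 1 (cday p s - 1) from dday_add hs]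
    rw [show dday p s = max 1 (cday p s) from rfl]
    set c := cday p s with hc
    by_cases hgt : m < max 1 c
    · rw [if_pos (show m - 1 < max 1 (c - 1) by omega), if_pos hgt]
      rw [show max 1 (c - 1) = max 1 c - 1 from by omega]
      have h := ih hpt (ans ++ if cnt ≠ 0 then [cnt] else []) 1 (max 1 c) (by omega)
      simp only [mapAdd] at h
      exact h
    · rw [if_neg (show ¬ m - 1 < max 1 (c - 1) by omega), if_neg hgt]
      have h := ih hpt ans (cnt + 1) m hm
      simp only [mapAdd] at h
      exact h

lemma popZ_nonneg : ∀ (X : List (Int × Int)), 0 ≤ (popZ X).1 := by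
  intro X
  induction X with
  | nil => simp [popZ]
  | cons x t ih =>
    simp only [popZ]
    by_cases h : 100 ≤ x.1
    · rw [if_pos h]; dsimp only; omega
    · rw [if_neg h]

lemma popZ_mem : ∀ (X : List (Int × Int)), ∀ x ∈ (popZ X).2, x ∈ X := by
  intro X
  induction X with
  | nil => simp [popZ]
  | cons x t ih =>
    intro y hy
    simp only [popZ] at hy
    by_cases h : 100 ≤ x.1
    · rw [if_pos h] at hy
      exact List.mem_cons_of_mem _ (ih y hy)
    · rw [if_neg h] at hy
      exact hy

lemma popind : ∀ (M : List (Int × Int)), (∀ pr ∈ M, 0 < pr.2) → ∀ (j : Int), 1 ≤ j →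
    finalizeB (M.foldl bstep ([], 1, j)) = (j + (popZ (mapAdd M)).1) :: Bz (popZ (mapAdd M)).2 := by
  intro M
  induction M with
  | nil =>
    intro _ j hj
    simp only [mapAdd, List.map_nil, popZ, List.foldl_nil]
    rw [show finalizeB ([], 1, j) = [j] from by simp [finalizeB]; omega]
    simp [Bz, finalizeB]
  | cons x t ih =>
    obtain ⟨p, s⟩ := x
    intro hpos j hj
    have hs : 0 < s := hpos (p, s) (by simp)
    have hpt : ∀ pr ∈ t, 0 < pr.2 := fun pr h => hpos pr (by simp [h])
    simp only [mapAdd, List.map_cons, List.foldl_cons, bstep_eq, popZ]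
    rw [show dday p s = max 1 (cday p s) from rfl]
    by_cases hpop : 100 ≤ p + s
    · have hc : cday p s ≤ 1 := (pop_iff hs).mp hpop
      rw [if_neg (show ¬ (1:Int) < max 1 (cday p s) by omega)]
      rw [if_pos hpop]
      have ihh := ih hpt (j + 1) (by omega)
      simp only [mapAdd] at ihh
      rw [ihh]
      dsimp only
      congr 1
      omega
    · have hc : 2 ≤ cday p s := by
        by_contra hcc
        exact hpop ((pop_iff hs).mpr (by omega))
      rw [if_pos (show (1:Int) < max 1 (cday p s) by omega)]
      rw [if_neg hpop]
      rw [show ([] ++ (if j ≠ 0 then [j] else []) : List Int) = [j] from by simp; omega]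
      rw [ans_factor]
      dsimp only
      have hBz : Bz ((p + s, s) :: List.map (fun pr : Int × Int => (pr.1 + pr.2, pr.2)) t)
          = finalizeB (t.foldl bstep ([], max 1 (cday p s), 1)) := by
        unfold Bz
        simp only [List.foldl_cons, bstep_eq]
        rw [show dday (p + s) s = max 1 (cday p s - 1) from dday_add hs]
        rw [if_pos (show (0:Int) < max 1 (cday p s - 1) by omega)]
        simp only [ne_eq, not_true_eq_false, List.nil_append]
        rw [show max 1 (cday p s - 1) = max 1 (cday p s) - 1 from by omega]
        have h := shift t hpt [] 1 (max 1 (cday p s)) (by omega)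
        simp only [mapAdd] at h
        exact h
      rw [hBz]
      rw [show j + 0 = j from by omega]
      rfl

lemma maxd_mapAdd : ∀ (L : List (Int × Int)), (∀ pr ∈ L, 0 < pr.2) →
    maxd (mapAdd L) ≤ max 1 (maxd L - 1) := by
  intro L
  induction L with
  | nil => intro _; simp [mapAdd, maxd]
  | cons x t ih =>
    obtain ⟨p, s⟩ := x
    intro hpos
    have hs : 0 < s := hpos (p, s) (by simp)
    have hpt : ∀ pr ∈ t, 0 < pr.2 := fun pr h => hpos pr (by simp [h])
    have h1 := ih hpt
    simp only [mapAdd, List.map_cons, maxd] at h1 ⊢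
    rw [show dday (p + s) s = max 1 (cday p s - 1) from dday_add hs]
    rw [show dday p s = max 1 (cday p s) from rfl]
    omega

lemma maxd_popZ : ∀ (X : List (Int × Int)), maxd (popZ X).2 ≤ maxd X := by
  intro X
  induction X with
  | nil => simp [popZ]
  | cons x t ih =>
    simp only [popZ]
    by_cases h : 100 ≤ x.1
    · rw [if_pos h]
      dsimp only
      have h2 : (1:Int) ≤ dday x.1 x.2 := le_max_left _ _
      simp only [maxd]
      omega
    · rw [if_neg h]

lemma allpop : ∀ (L : List (Int × Int)), (∀ pr ∈ L, 0 < pr.2) → maxd L ≤ 1 →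
    popZ (mapAdd L) = ((L.length : Int), []) := by
  intro L
  induction L with
  | nil => intro _ _; simp [mapAdd, popZ]
  | cons x t ih =>
    obtain ⟨p, s⟩ := x
    intro hpos hM
    have hs : 0 < s := hpos (p, s) (by simp)
    have hpt : ∀ pr ∈ t, 0 < pr.2 := fun pr h => hpos pr (by simp [h])
    simp only [maxd] at hM
    have hd : dday (p, s).1 (p, s).2 = max 1 (cday p s) := rfl
    have hc : cday p s ≤ 1 := by rw [hd] at hM; omega
    have hpop : 100 ≤ p + s := (pop_iff hs).mpr hc
    simp only [mapAdd, List.map_cons, popZ]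
    rw [if_pos hpop]
    have ht := ih hpt (by omega)
    simp only [mapAdd] at ht
    rw [ht]
    simp only [List.length_cons]
    rw [show ((t.length + 1 : Nat) : Int) = (t.length : Int) + 1 from by push_cast; ring]

lemma zsim_nil (f : Nat) : zsim f [] = [] := by cases f <;> rfl

lemma main_lemma : ∀ (f : Nat) (L : List (Int × Int)), (∀ pr ∈ L, 0 < pr.2) →
    maxd L ≤ (f : Int) → zsim f L = Bz L := by
  intro f
  induction f with
  | zero =>
    intro L hpos hle
    cases L with
    | nil => simp [zsim, Bz, finalizeB]
    | cons x t =>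
      exfalso
      have h1 : (1:Int) ≤ dday x.1 x.2 := le_max_left _ _
      simp only [maxd, Nat.cast_zero] at hle
      omega
  | succ f ih =>
    intro L hpos hle
    cases L with
    | nil => rw [zsim_nil]; simp [Bz, finalizeB]
    | cons x t =>
      obtain ⟨p, s⟩ := x
      have hs : 0 < s := hpos (p, s) (by simp)
      have hpt : ∀ pr ∈ t, 0 < pr.2 := fun pr h => hpos pr (by simp [h])
      have hposAddT : ∀ pr ∈ mapAdd t, 0 < pr.2 := by
        intro pr hpr
        simp only [mapAdd, List.mem_map] at hpr
        obtain ⟨q, hq, rfl⟩ := hpr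
        exact hpt q hq
      simp only [maxd] at hle
      rw [show dday (p, s).1 (p, s).2 = max 1 (cday p s) from rfl] at hle
      simp only [zsim, List.isEmpty_cons, Bool.false_eq_true, if_false]
      simp only [mapAdd, List.map_cons, popZ]
      rw [show ((p, s).1 + (p, s).2, (p, s).2) = (p + s, s) from rfl]
      by_cases hpop : 100 ≤ p + s
      · -- the head finishes this day: A pops a block, B's first group
        have hc : cday p s ≤ 1 := (pop_iff hs).mp hpop
        rw [if_pos (show 100 ≤ (p + s, s).1 from hpop)]
        set r := popZ (List.map (fun pr => (pr.1 + pr.2, pr.2)) t) with hr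
        have hk : 0 ≤ r.1 := popZ_nonneg _
        rw [if_pos (show (0:Int) < r.1 + 1 by omega)]
        have hrest : zsim f r.2 = Bz r.2 := by
          by_cases hM : maxd t ≤ 1
          · have hall : popZ (mapAdd t) = ((t.length : Int), []) := allpop t hpt hM
            simp only [mapAdd] at hall
            rw [hr, hall]
            rw [zsim_nil]
            simp [Bz, finalizeB]
          · apply ih
            · intro pr hpr
              have : pr ∈ mapAdd t := by
                have := popZ_mem (mapAdd t) pr
                simp only [mapAdd] at this ⊢
                exact this (by rw [← hr] at *; exact hpr)
              exact hposAddT pr this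
            · have h1 := maxd_popZ (mapAdd t)
              have h2 := maxd_mapAdd t hpt
              simp only [mapAdd] at h1 h2
              rw [← hr] at h1
              omega
        have hBz : Bz ((p, s) :: t) = (1 + r.1) :: Bz r.2 := by
          unfold Bz
          simp only [List.foldl_cons, bstep_eq]
          rw [show dday (p, s).1 (p, s).2 = max 1 (cday p s) from rfl]
          rw [if_pos (show (0:Int) < max 1 (cday p s) by omega)]
          simp only [ne_eq, List.nil_append]
          rw [show max 1 (cday p s) = 1 from by omega]
          have := popind t hpt 1 (by omega)
          simp only [mapAdd] at this
          rw [← hr] at this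
          exact this
        rw [hBz, hrest]
        dsimp only
        congr 1
        omega
      · -- nobody finishes this day: A just advances; one SHIFT step for B
        have hc : 2 ≤ cday p s := by
          by_contra hcc
          exact hpop ((pop_iff hs).mpr (by omega))
        rw [if_neg (show ¬ 100 ≤ (p + s, s).1 from hpop)]
        rw [if_neg (show ¬ ((0:Int) < (0, (p + s, s) :: List.map (fun pr => (pr.1 + pr.2, pr.2)) t).1) by omega)]
        dsimp only
        have hposAddL : ∀ pr ∈ (p + s, s) :: List.map (fun pr : Int × Int => (pr.1 + pr.2, pr.2)) t, 0 < pr.2 := by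
          intro pr hpr
          rcases List.mem_cons.mp hpr with h | h
          · rw [h]; exact hs
          · exact hposAddT pr (by simpa [mapAdd] using h)
        have hbound : maxd ((p + s, s) :: List.map (fun pr : Int × Int => (pr.1 + pr.2, pr.2)) t) ≤ (f : Int) := by
          have h2 := maxd_mapAdd ((p, s) :: t) hpos
          simp only [mapAdd, List.map_cons] at h2
          rw [show ((p, s).1 + (p, s).2, (p, s).2) = (p + s, s) from rfl] at h2
          simp only [maxd] at h2 ⊢
          rw [show dday (p, s).1 (p, s).2 = max 1 (cday p s) from rfl] at h2
          omega
        rw [ih _ hposAddL hbound]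
        unfold Bz
        simp only [List.foldl_cons, bstep_eq]
        rw [show dday (p + s, s).1 (p + s, s).2 = max 1 (cday p s - 1) from dday_add hs]
        rw [show dday (p, s).1 (p, s).2 = max 1 (cday p s) from rfl]
        rw [if_pos (show (0:Int) < max 1 (cday p s - 1) by omega)]
        rw [if_pos (show (0:Int) < max 1 (cday p s) by omega)]
        simp only [ne_eq, List.nil_append]
        rw [show max 1 (cday p s - 1) = max 1 (cday p s) - 1 from by omega]
        exact shift t hpt [] 1 (max 1 (cday p s)) (by omega)

lemma zipadd : ∀ (ps ss : List Int), ps.length ≤ ss.length →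
    (List.zipWith (· + ·) ps ss).zip ss = mapAdd (ps.zip ss) := by
  intro ps
  induction ps with
  | nil => intro ss _; simp [mapAdd]
  | cons p pt ih =>
    intro ss h
    cases ss with
    | nil => simp at h
    | cons s st =>
      simp only [List.zipWith_cons_cons, List.zip_cons_cons, mapAdd, List.map_cons]
      refine congrArg _ ?_
      have := ih st (by simpa using h)
      simpa [mapAdd] using this

lemma popA_spec : ∀ (ps ss : List Int), ps.length ≤ ss.length →
    (popA ps ss).1 = (popZ (ps.zip ss)).1 ∧
    (popA ps ss).2.1.zip (popA ps ss).2.2 = (popZ (ps.zip ss)).2 ∧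
    (popA ps ss).2.1.length ≤ (popA ps ss).2.2.length := by
  intro ps
  induction ps with
  | nil => intro ss h; simp [popA, popZ]
  | cons p pt ih =>
    intro ss h
    cases ss with
    | nil => simp at h
    | cons s st =>
      simp only [popA, popZ, List.zip_cons_cons]
      by_cases hp : 100 ≤ p
      · rw [if_pos hp, if_pos (show 100 ≤ (p, s).1 from hp)]
        obtain ⟨h1, h2, h3⟩ := ih st (by simpa using h)
        exact ⟨by omega, h2, h3⟩
      · rw [if_neg hp, if_neg (show ¬ 100 ≤ (p, s).1 from hp)]
        exact ⟨rfl, rfl, by simpa using h⟩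

lemma simA_zsim : ∀ (f : Nat) (ps ss : List Int), ps.length ≤ ss.length →
    simA f ps ss = zsim f (ps.zip ss) := by
  intro f
  induction f with
  | zero => intro ps ss _; rfl
  | succ f ih =>
    intro ps ss h
    cases ps with
    | nil => simp [simA, zsim]
    | cons p pt =>
      cases ss with
      | nil => simp at h
      | cons s st =>
        have hlen1 : (List.zipWith (· + ·) (p :: pt) (s :: st)).length ≤ (s :: st).length := by
          simp [List.length_zipWith]
        obtain ⟨h1, h2, h3⟩ := popA_spec (List.zipWith (· + ·) (p :: pt) (s :: st)) (s :: st) hlen1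
        have hz := zipadd (p :: pt) (s :: st) h
        rw [hz] at h1 h2
        simp only [simA, zsim, List.isEmpty_cons, Bool.false_eq_true, if_false,
          List.zip_cons_cons]
        rw [show ((p :: pt).zip (s :: st) : List (Int × Int)) = (p, s) :: pt.zip st from by
          simp]  at *
        rw [ih _ _ h3, h1, h2]

lemma dday_le {p s : Int} (hs : 0 < s) : dday p s ≤ 101 + (p.natAbs : Int) := by
  obtain ⟨h1, h2⟩ := cday_bracket (p := p) hs
  unfold dday
  by_cases h : cday p s ≤ 1
  · omega
  · have h3 : (cday p s - 1) * 1 ≤ (cday p s - 1) * s := by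
      apply mul_le_mul_of_nonneg_left (by omega) (by omega)
    have h4 : cday p s - 1 < 100 - p := by linarith
    omega

lemma maxd_le_sum : ∀ (L : List (Int × Int)), (∀ pr ∈ L, 0 < pr.2) →
    maxd L ≤ 101 + (L.map (fun pr : Int × Int => (pr.1.natAbs : Int))).sum := by
  intro L
  induction L with
  | nil => intro _; simp [maxd]
  | cons x t ih =>
    intro hpos
    have hs : 0 < x.2 := hpos x (by simp)
    have hpt : ∀ pr ∈ t, 0 < pr.2 := fun pr h => hpos pr (by simp [h])
    have h1 := ih hpt
    have h2 : dday x.1 x.2 ≤ 101 + (x.1.natAbs : Int) := dday_le hs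
    have h3 : (0:Int) ≤ (t.map (fun pr : Int × Int => (pr.1.natAbs : Int))).sum :=
      List.sum_nonneg (by intro y hy; simp only [List.mem_map] at hy; obtain ⟨q, _, rfl⟩ := hy; positivity)
    simp only [maxd, List.map_cons, List.sum_cons]
    omega

-- ===== VERDICT (by name: the statement is the Claim_ definition above) =====
theorem solution_spec : Claim_equal_solution := by
  intro ps ss _ hpre
  obtain ⟨hlen, hpos⟩ := hpre
  show solution ps ss = solution_alt ps ss
  unfold solution
  rw [simA_zsim _ _ _ hlen]
  rw [main_lemma _ _ hpos ?_]
  · rfl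
  · have h := maxd_le_sum (ps.zip ss) hpos
    have hmap : (ps.zip ss).map (fun pr : Int × Int => (pr.1.natAbs : Int))
        = ps.map (fun p => ((p.natAbs : Nat) : Int)) := by
      rw [show (fun pr : Int × Int => (pr.1.natAbs : Int))
          = (fun p : Int => ((p.natAbs : Nat) : Int)) ∘ Prod.fst from rfl]
      rw [← List.map_map, List.map_fst_zip hlen]
    rw [hmap] at h
    rw [show ((101 + (ps.map Int.natAbs).sum : Nat) : Int)
        = 101 + ((ps.map Int.natAbs).map (Nat.cast : Nat → Int)).sum from by
      rw [Nat.cast_add, Nat.cast_list_sum]; norm_num]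
    rw [List.map_map]
    exact h
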